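-- pv_equiv track=rewrite | github.com/LawlietJH/ReadLE | ReadLE.py | getXY
-- ===== SOURCE A (Python) =====
-- def getXY(rle):
-- 	rle = rle.split('$')
-- 	digits = ''
-- 	num = 0
-- 	x = 0
-- 	for row in rle:
-- 		for col in row:
-- 			if col in 'bo1234567890':
-- 				if col.isdigit():
-- 					digits += col
-- 				else:
-- 					if digits:
-- 						num += int(digits)
-- 						digits = ''
-- 					else:
-- 						num += 1
-- 					if num > x:
-- 						x = num
-- 		digits = ''
-- 		num = 0
-- 	return x, len(rle)
-- ===== SOURCE B (Python) =====
-- def _runs(s):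
--     # s contains only 'b', 'o' and digits: cut it into maximal runs matching
--     # r'\d*[bo]' (longest digit prefix plus one tag), dropping trailing digits
--     out = []
--     i = 0
--     n = len(s)
--     while i < n:
--         j = i
--         while j < n and s[j].isdigit():
--             j += 1
--         if j == n:
--             break
--         out.append(s[i:j + 1])
--         i = j + 1
--     return out
--
--
-- def getXY(rle):
--     rows = rle.split('$')
--     width = 0
--     for row in rows:
--         cleaned = ''.join(c for c in row if c in 'bo0123456789')
--         w = sum(int(t[:-1]) if len(t) > 1 else 1 for t in _runs(cleaned))
--         width = max(width, w)
--     return width, len(rows)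
-- ===== Notes on version B (the rewrite author's own statement) =====
-- stated objective: alternative
-- what changed: A's single stateful nested loop threading a digit buffer, a run counter and a running max is replaced by staged passes: filter each '$'-row to its significant characters, recursively cut the filtered string into explicit run tokens (longest digit prefix plus one tag), then map each token to its int value and sum, taking max over rows.
import Mathlib
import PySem

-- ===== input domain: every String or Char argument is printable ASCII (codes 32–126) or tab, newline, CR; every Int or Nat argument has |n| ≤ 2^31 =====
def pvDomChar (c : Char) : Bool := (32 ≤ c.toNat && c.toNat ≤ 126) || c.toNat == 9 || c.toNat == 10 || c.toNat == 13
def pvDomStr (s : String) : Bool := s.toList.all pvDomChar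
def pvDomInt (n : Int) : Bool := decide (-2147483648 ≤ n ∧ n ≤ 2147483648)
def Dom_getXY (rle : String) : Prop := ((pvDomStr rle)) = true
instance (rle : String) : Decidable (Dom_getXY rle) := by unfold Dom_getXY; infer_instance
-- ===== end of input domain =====

-- B replaces A's stateful nested loop (digit buffer + run counter + running max threaded through one pass)
-- by staged passes: filter each row, recursively cut it into explicit run tokens, map tokens to ints and sum ('alternative'; same cost).

-- ===== PORT A =====
-- state of A's loop: (digits, num, x); strings handled on the List Char side.
-- Note: int(digits) is only reached with digits a nonempty run of '0'..'9', where
-- PySem.Int.ofChars? always returns some, so the .getD 0 default is unreachable.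
def getXY (rle : String) : Int × Int :=
  let rows := PySem.Chars.splitOn rle.toList ['$']
  let st := rows.foldl (fun (st : List Char × Int × Int) row =>
    let st2 := row.foldl (fun (s : List Char × Int × Int) col =>
      if PySem.Chars.isIn [col] "bo1234567890".toList then
        if PySem.Chars.isdigit col then (s.1 ++ [col], s.2.1, s.2.2)
        else
          -- if digits: num += int(digits); digits = '' ; else: num += 1  (digits is '' afterwards either way)
          let num := if s.1 ≠ [] then s.2.1 + (PySem.Int.ofChars? s.1).getD 0 else s.2.1 + 1
          (([] : List Char), num, if num > s.2.2 then num else s.2.2)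
      else s) st
    (([] : List Char), (0 : Int), st2.2.2)) (([] : List Char), (0 : Int), (0 : Int))
  (st.2.2, (rows.length : Int))

-- ===== PORT B =====
-- _runs: the while loop computes i = length of the longest leading digit run (= takeWhile isdigit);
-- s[:i+1] is that prefix plus the following tag, s[i+1:] is the rest; i == len(s) (dropWhile = []) returns [].
def runsAlt (s : List Char) : List (List Char) :=
  match h : s.dropWhile PySem.Chars.isdigit with
  | [] => []
  | t :: r => (s.takeWhile PySem.Chars.isdigit ++ [t]) :: runsAlt r
termination_by s.length
decreasing_by
  have h1 : (s.dropWhile PySem.Chars.isdigit).length ≤ s.length := s.length_dropWhile_le _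
  rw [h] at h1; simp at h1; omega

-- int(t[:-1]) (t[:-1] = dropLast) is only reached with len(t) > 1, i.e. a nonempty digit run
-- before the tag, where PySem.Int.ofChars? returns some, so the .getD 0 default is unreachable.
def getXY_alt (rle : String) : Int × Int :=
  let rows := PySem.Chars.splitOn rle.toList ['$']
  let width := rows.foldl (fun w row =>
    let cleaned := row.filter (fun c => PySem.Chars.isIn [c] "bo0123456789".toList)
    let rw := (runsAlt cleaned).foldl
      (fun s t => s + (if t.length > 1 then (PySem.Int.ofChars? t.dropLast).getD 0 else 1)) 0
    max w rw) 0
  (width, (rows.length : Int))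

-- ===== PRECONDITION & SPEC =====
def Spec_getXY (rle : String) (out : Int × Int) : Prop := out = getXY_alt rle
instance (rle : String) (out : Int × Int) : Decidable (Spec_getXY rle out) := by unfold Spec_getXY; infer_instance

-- ===== CLAIM (what is proved, stated in full; the proofs are below) =====
def Claim_equal_getXY : Prop := ∀ (rle : String), Dom_getXY rle → Spec_getXY rle (getXY rle)

-- ===== LEMMAS AND PROOFS =====

-- the value a run of accumulated digit characters contributes when a tag ('b'/'o') is met
def pvVal (d : List Char) : Int := if d = [] then 1 else (PySem.Int.ofChars? d).getD 0

-- the width contributed by the rest of a row, given the pending digit run d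
def pvW : List Char → List Char → Int
  | _, [] => 0
  | d, c :: l =>
      if c = 'b' ∨ c = 'o' then pvVal d + pvW [] l
      else if PySem.Chars.isdigit c then pvW (d ++ [c]) l
      else pvW d l

theorem pv_mem_big (c : Char) :
    PySem.Chars.isIn [c] "bo1234567890".toList = true ↔
      (c = 'b' ∨ c = 'o' ∨ PySem.Chars.isdigit c = true) := by
  rw [PySem.Chars.isIn_iff_infix, List.singleton_infix_iff]
  show c ∈ ['b','o','1','2','3','4','5','6','7','8','9','0'] ↔ _
  simp only [List.mem_cons, List.not_mem_nil, or_false, PySem.Chars.isdigit,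
    Bool.and_eq_true, decide_eq_true_eq, Char.le_def]
  constructor
  · rintro (rfl | rfl | rfl | rfl | rfl | rfl | rfl | rfl | rfl | rfl | rfl | rfl) <;> simp
  · rintro (rfl | rfl | h)
    · exact Or.inl rfl
    · exact Or.inr (Or.inl rfl)
    · right; right
      rcases h with ⟨h1, h2⟩
      rw [UInt32.le_iff_toNat_le] at h1 h2
      have h48 : (('0' : Char).val).toNat = 48 := by decide
      have h57 : (('9' : Char).val).toNat = 57 := by decide
      rw [h48] at h1; rw [h57] at h2
      have hc : Char.ofNat c.val.toNat = c := Char.ofNat_toNat c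
      have : Char.ofNat c.val.toNat ∈ ['1','2','3','4','5','6','7','8','9','0'] := by
        interval_cases h : (c.val.toNat) <;> decide
      rw [hc] at this
      simpa using this

theorem pv_mem_big' (c : Char) :
    PySem.Chars.isIn [c] "bo0123456789".toList = true ↔
      (c = 'b' ∨ c = 'o' ∨ PySem.Chars.isdigit c = true) := by
  rw [PySem.Chars.isIn_iff_infix, List.singleton_infix_iff, ← pv_mem_big,
    PySem.Chars.isIn_iff_infix, List.singleton_infix_iff]
  show c ∈ ['b','o','0','1','2','3','4','5','6','7','8','9'] ↔
      c ∈ ['b','o','1','2','3','4','5','6','7','8','9','0']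
  constructor <;> (intro h; simp only [List.mem_cons, List.not_mem_nil, or_false] at h ⊢; tauto)

theorem pv_tag_not_digit {c : Char} (h : c = 'b' ∨ c = 'o') :
    PySem.Chars.isdigit c = false := by
  rcases h with rfl | rfl <;> decide

-- a nonempty option produced by the digit-string parse is a cast Nat, hence ≥ 0
theorem pv_getD_map_nonneg (o : Option Nat) :
    0 ≤ (Option.map (fun n : Int => n) (o.bind fun a => pure ((a : Nat) : Int))).getD 0 := by
  cases o <;> simp

theorem pv_ofChars_nonneg (d : List Char)
    (hd : ∀ c ∈ d, PySem.Chars.isdigit c = true) :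
    0 ≤ (PySem.Int.ofChars? d).getD 0 := by
  have hs : ∀ c ∈ d, PySem.Int.isIntSpace c = false := by
    intro c hc
    have := hd c hc
    simp only [PySem.Chars.isdigit, Bool.and_eq_true, decide_eq_true_eq] at this
    simp only [PySem.Int.isIntSpace, Bool.or_eq_false_iff, decide_eq_false_iff_not]
    refine ⟨⟨⟨⟨⟨?_, ?_⟩, ?_⟩, ?_⟩, ?_⟩, ?_⟩ <;> rintro rfl <;> revert this <;> decide
  have hdrop : ∀ (l : List Char), (∀ c ∈ l, PySem.Int.isIntSpace c = false) →
      l.dropWhile PySem.Int.isIntSpace = l := by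
    intro l hl
    cases l with
    | nil => rfl
    | cons a t => rw [List.dropWhile_cons_of_neg]; simp [hl a (List.mem_cons_self)]
  unfold PySem.Int.ofChars?
  rw [hdrop d hs, hdrop d.reverse (by intro c hc; exact hs c (List.mem_reverse.mp hc)),
    List.reverse_reverse]
  cases d with
  | nil => exact pv_getD_map_nonneg _
  | cons a t =>
      have ha : PySem.Chars.isdigit a = true := hd a List.mem_cons_self
      have hab : a ≠ '-' := by rintro rfl; revert ha; decide
      have hap : a ≠ '+' := by rintro rfl; revert ha; decide
      simp only []
      split
      · rename_i heq; rw [List.cons.injEq] at heq; exact absurd heq.1 hab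
      · rename_i heq; rw [List.cons.injEq] at heq; exact absurd heq.1 hap
      · exact pv_getD_map_nonneg _

theorem pvVal_nonneg (d : List Char) (hd : ∀ c ∈ d, PySem.Chars.isdigit c = true) :
    0 ≤ pvVal d := by
  unfold pvVal
  split
  · omega
  · exact pv_ofChars_nonneg d hd

theorem pvW_digits_snoc : ∀ (d : List Char) (c : Char),
    PySem.Chars.isdigit c = true →
    (∀ e ∈ d, PySem.Chars.isdigit e = true) →
    (∀ e ∈ d ++ [c], PySem.Chars.isdigit e = true) := by
  intro d c hc hd e he
  rcases List.mem_append.mp he with h | h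
  · exact hd e h
  · simp only [List.mem_singleton] at h; subst h; exact hc

theorem pvW_nonneg : ∀ (l d : List Char),
    (∀ c ∈ d, PySem.Chars.isdigit c = true) → 0 ≤ pvW d l := by
  intro l
  induction l with
  | nil => intro d _; simp [pvW]
  | cons c t ih =>
      intro d hd
      simp only [pvW]
      split
      · rename_i htag
        have := pvVal_nonneg d hd
        have := ih [] (by simp)
        omega
      · split
        · rename_i hdig
          exact ih (d ++ [c]) (pvW_digits_snoc d c hdig hd)
        · exact ih d hd

-- A's inner loop: final x is the max of the incoming x and the row total
theorem pv_innerA : ∀ (l d : List Char) (num x : Int),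
    num ≤ x → (∀ c ∈ d, PySem.Chars.isdigit c = true) →
    (l.foldl (fun (s : List Char × Int × Int) col =>
      if PySem.Chars.isIn [col] "bo1234567890".toList then
        if PySem.Chars.isdigit col then (s.1 ++ [col], s.2.1, s.2.2)
        else
          let num := if s.1 ≠ [] then s.2.1 + (PySem.Int.ofChars? s.1).getD 0 else s.2.1 + 1
          (([] : List Char), num, if num > s.2.2 then num else s.2.2)
      else s) (d, num, x)).2.2 = max x (num + pvW d l) := by
  intro l
  induction l with
  | nil => intro d num x hnx _; simp [pvW]; omega
  | cons c t ih =>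
      intro d num x hnx hd
      by_cases htag : c = 'b' ∨ c = 'o'
      · have hbig : PySem.Chars.isIn [c] "bo1234567890".toList = true :=
          (pv_mem_big c).mpr (by tauto)
        have hdig : PySem.Chars.isdigit c = false := pv_tag_not_digit htag
        simp only [List.foldl_cons, hbig, if_true, hdig, Bool.false_eq_true, if_false]
        have hval : (if d ≠ [] then num + (PySem.Int.ofChars? d).getD 0 else num + 1)
            = num + pvVal d := by
          unfold pvVal; split_ifs with h1 h2 <;> simp_all
        rw [hval]
        have hW0 : 0 ≤ pvW [] t := pvW_nonneg t [] (by simp)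
        have hv : 0 ≤ pvVal d := pvVal_nonneg d hd
        rw [ih [] (num + pvVal d) (if num + pvVal d > x then num + pvVal d else x)
          (by split <;> omega) (by simp)]
        simp only [pvW, htag, if_true]
        split <;> omega
      · by_cases hdig : PySem.Chars.isdigit c = true
        · have hbig : PySem.Chars.isIn [c] "bo1234567890".toList = true :=
            (pv_mem_big c).mpr (by tauto)
          simp only [List.foldl_cons, hbig, if_true, hdig]
          rw [ih (d ++ [c]) num x hnx (pvW_digits_snoc d c hdig hd)]
          simp only [pvW, htag, if_false, hdig, if_true]
        · have hbig : PySem.Chars.isIn [c] "bo1234567890".toList = false := by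
            rw [Bool.eq_false_iff]
            intro h
            rcases (pv_mem_big c).mp h with h' | h' | h' <;> tauto
          simp only [List.foldl_cons, hbig, Bool.false_eq_true, if_false]
          rw [ih d num x hnx hd]
          simp [pvW, htag, hdig]

-- A's outer loop: running max of the row widths
theorem pv_outerA : ∀ (rows : List (List Char)) (x : Int), 0 ≤ x →
    (rows.foldl (fun (st : List Char × Int × Int) row =>
      let st2 := row.foldl (fun (s : List Char × Int × Int) col =>
        if PySem.Chars.isIn [col] "bo1234567890".toList then
          if PySem.Chars.isdigit col then (s.1 ++ [col], s.2.1, s.2.2)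
          else
            let num := if s.1 ≠ [] then s.2.1 + (PySem.Int.ofChars? s.1).getD 0 else s.2.1 + 1
            (([] : List Char), num, if num > s.2.2 then num else s.2.2)
        else s) st
      (([] : List Char), (0 : Int), st2.2.2)) (([] : List Char), (0 : Int), x)).2.2
    = rows.foldl (fun a r => max a (pvW [] r)) x := by
  intro rows
  induction rows with
  | nil => intro x _; rfl
  | cons r rs ih =>
      intro x hx
      simp only [List.foldl_cons]
      rw [pv_innerA r [] 0 x hx (by simp)]
      rw [ih (max x (0 + pvW [] r)) (by omega)]
      norm_num

-- ===== B-side lemmas =====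

-- filtering a row to its significant characters does not change pvW
theorem pv_filter_pvW : ∀ (l d : List Char),
    pvW d (l.filter (fun c => PySem.Chars.isIn [c] "bo0123456789".toList)) = pvW d l := by
  intro l
  induction l with
  | nil => intro d; rfl
  | cons c t ih =>
      intro d
      by_cases hbig : PySem.Chars.isIn [c] "bo0123456789".toList = true
      · rw [show List.filter (fun c => PySem.Chars.isIn [c] "bo0123456789".toList) (c :: t)
              = c :: List.filter (fun c => PySem.Chars.isIn [c] "bo0123456789".toList) t by
            simp only [List.filter_cons]; rw [if_pos hbig]]
        rcases (pv_mem_big' c).mp hbig with h | h | h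
        · simp only [pvW, h, true_or, if_true, ih]
        · simp only [pvW, h, or_true, if_true, ih]
        · have htag : ¬ (c = 'b' ∨ c = 'o') := by
            rintro (rfl | rfl) <;> revert h <;> decide
          simp only [pvW, htag, if_false, h, if_true, ih]
      · rw [show List.filter (fun c => PySem.Chars.isIn [c] "bo0123456789".toList) (c :: t)
              = List.filter (fun c => PySem.Chars.isIn [c] "bo0123456789".toList) t by
            simp only [List.filter_cons]; rw [if_neg hbig]]
        have htag : ¬ (c = 'b' ∨ c = 'o') := by
          intro h; exact hbig ((pv_mem_big' c).mpr (by tauto))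
        have hdig : ¬ PySem.Chars.isdigit c = true := by
          intro h; exact hbig ((pv_mem_big' c).mpr (by tauto))
        simp only [pvW, htag, if_false, ih]
        simp [hdig]

-- an all-digit string contributes nothing (the pending run is dropped at row end)
theorem pv_all_digits_pvW : ∀ (l d : List Char),
    (∀ c ∈ l, PySem.Chars.isdigit c = true) → pvW d l = 0 := by
  intro l
  induction l with
  | nil => intro d _; rfl
  | cons c t ih =>
      intro d hl
      have hc : PySem.Chars.isdigit c = true := hl c List.mem_cons_self
      have htag : ¬ (c = 'b' ∨ c = 'o') := by
        rintro (rfl | rfl) <;> revert hc <;> decide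
      simp only [pvW, htag, if_false, hc, if_true]
      exact ih _ (fun e he => hl e (List.mem_cons_of_mem _ he))

-- a leading digit run is pushed into the pending-run argument of pvW
theorem pv_digits_prefix_pvW : ∀ (ds l d : List Char),
    (∀ c ∈ ds, PySem.Chars.isdigit c = true) → pvW d (ds ++ l) = pvW (d ++ ds) l := by
  intro ds
  induction ds with
  | nil => intro l d _; simp
  | cons c t ih =>
      intro l d hd
      have hc : PySem.Chars.isdigit c = true := hd c List.mem_cons_self
      have htag : ¬ (c = 'b' ∨ c = 'o') := by
        rintro (rfl | rfl) <;> revert hc <;> decide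
      simp only [List.cons_append, pvW, htag, if_false, hc, if_true]
      rw [ih l (d ++ [c]) (fun e he => hd e (List.mem_cons_of_mem _ he))]
      simp

-- B's token sum over runsAlt computes pvW [] (on strings of significant characters)
theorem pv_runs_sum : ∀ (n : Nat) (s : List Char), s.length ≤ n →
    (∀ c ∈ s, c = 'b' ∨ c = 'o' ∨ PySem.Chars.isdigit c = true) →
    ∀ (a : Int),
    (runsAlt s).foldl
      (fun v t => v + (if t.length > 1 then (PySem.Int.ofChars? t.dropLast).getD 0 else 1)) a
      = a + pvW [] s := by
  intro n
  induction n with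
  | zero =>
      intro s hs _ a
      have : s = [] := List.length_eq_zero_iff.mp (Nat.le_zero.mp hs)
      subst this
      simp [runsAlt, pvW]
  | succ n ih =>
      intro s hs hmem a
      rw [runsAlt]
      split
      · rename_i h
        have hall : ∀ c ∈ s, PySem.Chars.isdigit c = true := by
          intro c hc
          by_contra hnc
          have := List.dropWhile_eq_nil_iff.mp h  -- every element satisfies isdigit
          exact hnc (this c hc)
        rw [pv_all_digits_pvW s [] hall]
        simp
      · rename_i t r h
        have hsplit : s.takeWhile PySem.Chars.isdigit ++ (t :: r) = s := by
          rw [← h]; exact List.takeWhile_append_dropWhile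
        have hds : ∀ c ∈ s.takeWhile PySem.Chars.isdigit, PySem.Chars.isdigit c = true := by
          intro c hc; exact List.mem_takeWhile_imp hc
        have htmem : t ∈ s := by
          rw [← hsplit]; exact List.mem_append.mpr (Or.inr List.mem_cons_self)
        have htd : PySem.Chars.isdigit t = false := by
          have := List.head?_dropWhile_not PySem.Chars.isdigit s
          rw [h] at this; simpa using this
        have htag : t = 'b' ∨ t = 'o' := by
          rcases hmem t htmem with h' | h' | h'
          · exact Or.inl h'
          · exact Or.inr h'
          · rw [htd] at h'; exact absurd h' (by simp)
        have hrsub : ∀ c ∈ r, c = 'b' ∨ c = 'o' ∨ PySem.Chars.isdigit c = true := by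
          intro c hc
          exact hmem c (by rw [← hsplit]; exact List.mem_append.mpr (Or.inr (List.mem_cons_of_mem _ hc)))
        have hrlen : r.length ≤ n := by
          have h1 : (s.dropWhile PySem.Chars.isdigit).length ≤ s.length :=
            s.length_dropWhile_le _
          rw [h] at h1; simp only [List.length_cons] at h1; omega
        simp only [List.foldl_cons]
        rw [ih r hrlen hrsub]
        -- token value = pvVal of the digit prefix
        have hval : (if (s.takeWhile PySem.Chars.isdigit ++ [t]).length > 1 then
              (PySem.Int.ofChars? (s.takeWhile PySem.Chars.isdigit ++ [t]).dropLast).getD 0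
            else 1) = pvVal (s.takeWhile PySem.Chars.isdigit) := by
          rw [List.dropLast_concat]
          unfold pvVal
          rcases Decidable.em (s.takeWhile PySem.Chars.isdigit = []) with he | he
          · simp [he]
          · have hlen : (s.takeWhile PySem.Chars.isdigit ++ [t]).length > 1 := by
              have := List.length_pos_iff.mpr he
              simp only [List.length_append, List.length_cons, List.length_nil]
              omega
            simp only [hlen, if_true, he, if_false]
        rw [hval]
        conv_rhs => rw [← hsplit]
        rw [pv_digits_prefix_pvW _ _ [] hds]
        simp only [List.nil_append, pvW, htag, if_true]
        omega

-- ===== VERDICT (by name: the statement is the Claim_ definition above) =====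
theorem getXY_spec : Claim_equal_getXY := by
  intro rle _
  unfold Spec_getXY getXY getXY_alt
  simp only
  refine Prod.ext ?_ rfl
  rw [pv_outerA _ 0 le_rfl]
  apply PySem.List.foldl_congr_mem
  intro a r _
  have hmem : ∀ c ∈ r.filter (fun c => PySem.Chars.isIn [c] "bo0123456789".toList),
      c = 'b' ∨ c = 'o' ∨ PySem.Chars.isdigit c = true := by
    intro c hc
    exact (pv_mem_big' c).mp (by simpa using (List.mem_filter.mp hc).2)
  rw [pv_runs_sum _ _ le_rfl hmem 0]
  rw [pv_filter_pvW]
  omega
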